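-- pv_equiv track=rewrite | github.com/meatsby/Algorithm | bootcampprep/wtc4/5.py | solution
-- ===== SOURCE A (Python) =====
-- def isEnd(answer, rows):
--     isTrue = 0
--     for a in answer:
--         if 0 not in a:
--             isTrue += 1
--     if isTrue == rows:
--         return True
--     return False
--
-- def solution(rows, columns):
--     answer = [[0]*columns for _ in range(rows)]
--     x, y = 0, 0
--     answer[x][y] = 1
--
--     dx = [1, 0]
--     dy = [0, 1]
--
--     mx, mn = max(rows, columns), min(rows, columns)
--
--     n = 0
--     if mx%mn == 0 and rows > 2:
--         n = mx*2 - 1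
--
--     t = 0
--     while True:
--         if n and n == t:
--             break
--         if not n and isEnd(answer, rows):
--             break
--         d = answer[x][y]%2
--         nx = (x + dx[d])%rows
--         ny = (y + dy[d])%columns
--         answer[nx][ny] = answer[x][y] + 1
--         x, y = nx, ny
--         t += 1
--
--     return answer
-- ===== SOURCE B (Python) =====
-- def solution(rows, columns):
--     answer = [[0] * columns for _ in range(rows)]
--     answer[0][0] = 1
--
--     zeros = [columns] * rows          # zeros[i] = number of 0 cells left in row i
--     zeros[0] -= 1
--     full = 1 if zeros[0] == 0 else 0  # number of completely filled rows
--
--     mx, mn = max(rows, columns), min(rows, columns)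
--     n = mx * 2 - 1 if mx % mn == 0 and rows > 2 else 0
--
--     x = y = t = 0
--     v = 1                             # v == answer[x][y] at all times
--     while (t != n) if n else (full != rows):
--         if v % 2:
--             y = (y + 1) % columns
--         else:
--             x = (x + 1) % rows
--         if answer[x][y] == 0:
--             zeros[x] -= 1
--             if zeros[x] == 0:
--                 full += 1
--         v += 1
--         answer[x][y] = v
--         t += 1
--     return answer
-- ===== Notes on version B (the rewrite author's own statement) =====
-- stated objective: faster
-- what changed: B replaces A's full-grid 'isEnd' rescan after every step by incrementally maintained per-row zero counters and a filled-row counter, and tracks the current cell value in a variable instead of re-reading the grid.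
import Mathlib
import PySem

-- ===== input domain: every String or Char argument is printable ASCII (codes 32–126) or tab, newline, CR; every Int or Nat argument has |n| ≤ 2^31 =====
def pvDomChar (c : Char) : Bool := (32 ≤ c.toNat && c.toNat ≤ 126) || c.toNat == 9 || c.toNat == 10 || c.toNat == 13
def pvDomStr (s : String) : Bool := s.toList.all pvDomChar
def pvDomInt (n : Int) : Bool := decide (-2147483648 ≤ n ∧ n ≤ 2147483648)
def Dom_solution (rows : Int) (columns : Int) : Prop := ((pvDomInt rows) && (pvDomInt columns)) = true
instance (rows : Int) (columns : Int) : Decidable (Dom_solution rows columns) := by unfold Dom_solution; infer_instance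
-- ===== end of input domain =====

-- B replaces A's full-grid isEnd rescan after every step by incrementally maintained
-- per-row zero counters and a filled-row counter (objective: faster, asymptotic).

-- ===== PORT A =====
-- grid read answer[x][y] / write answer[x][y] = v; exact whenever the indices are in
-- range (in Python an out-of-range index raises; under Pre_ the loop indices are always in range)
def pvGet2 (a : List (List Int)) (x y : Int) : Int :=
  PySem.List.pyGetD (PySem.List.pyGetD a x []) y 0

def pvSet2 (a : List (List Int)) (x y : Int) (v : Int) : List (List Int) :=
  PySem.List.pySetD a x (PySem.List.pySetD (PySem.List.pyGetD a x []) y v)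

def isEnd (answer : List (List Int)) (rows : Int) : Bool :=
  (answer.foldl (fun acc a => if a.contains 0 then acc else acc + 1) (0 : Int)) == rows

-- fuel for the transliterated 'while True' loops: large enough for every run that
-- terminates in Python (the equivalence proof does not depend on its size)
def pvFuel (rows columns : Int) : Nat := (2*rows*columns + 2*(rows+columns) + 8).toNat

def loopA (rows columns n : Int) : Nat → List (List Int) → Int → Int → Int → List (List Int)
  | 0, answer, _, _, _ => answer
  | fuel+1, answer, x, y, t =>
    if n != 0 && n == t then answer
    else if n == 0 && isEnd answer rows then answer
    else
      let d := PySem.Int.mod (pvGet2 answer x y) 2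
      let nx := PySem.Int.mod (x + PySem.List.pyGetD ([1, 0] : List Int) d 0) rows
      let ny := PySem.Int.mod (y + PySem.List.pyGetD ([0, 1] : List Int) d 0) columns
      loopA rows columns n fuel (pvSet2 answer nx ny (pvGet2 answer x y + 1)) nx ny (t + 1)

def solution (rows : Int) (columns : Int) : List (List Int) :=
  let answer := pvSet2 (List.replicate rows.toNat (List.replicate columns.toNat (0 : Int))) 0 0 1
  let mx := max rows columns
  let mn := min rows columns
  let n : Int := if PySem.Int.mod mx mn == 0 && decide ((2 : Int) < rows) then mx * 2 - 1 else 0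
  loopA rows columns n (pvFuel rows columns) answer 0 0 0

-- ===== PORT B =====
def loopB (rows columns n : Int) : Nat → List (List Int) → List Int → Int → Int → Int → Int → Int → List (List Int)
  | 0, answer, _, _, _, _, _, _ => answer
  | fuel+1, answer, zeros, full, x, y, t, v =>
    if (if n != 0 then t != n else full != rows) then
      let x' := if PySem.Int.mod v 2 != 0 then x else PySem.Int.mod (x + 1) rows
      let y' := if PySem.Int.mod v 2 != 0 then PySem.Int.mod (y + 1) columns else y
      let hit := PySem.List.pyGetD (PySem.List.pyGetD answer x' []) y' 0 == 0
      let zeros' := if hit then PySem.List.pySetD zeros x' (PySem.List.pyGetD zeros x' 0 - 1) else zeros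
      let full' := if hit && (PySem.List.pyGetD zeros' x' 0 == 0) then full + 1 else full
      loopB rows columns n fuel (pvSet2 answer x' y' (v + 1)) zeros' full' x' y' (t + 1) (v + 1)
    else answer

def solution_alt (rows : Int) (columns : Int) : List (List Int) :=
  let answer := pvSet2 (List.replicate rows.toNat (List.replicate columns.toNat (0 : Int))) 0 0 1
  let zeros0 := List.replicate rows.toNat columns
  let zeros := PySem.List.pySetD zeros0 0 (PySem.List.pyGetD zeros0 0 0 - 1)
  let full : Int := if PySem.List.pyGetD zeros 0 0 == 0 then 1 else 0
  let mx := max rows columns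
  let mn := min rows columns
  let n : Int := if PySem.Int.mod mx mn == 0 && decide ((2 : Int) < rows) then mx * 2 - 1 else 0
  loopB rows columns n (pvFuel rows columns) answer zeros full 0 0 0 1

-- ===== PRECONDITION & SPEC =====
-- Pre_ excludes exactly the inputs where the Python raises (rows < 1 or columns < 1:
-- IndexError / ZeroDivisionError) or where A's while-loop never terminates
-- (gcd(rows,columns) ≥ 3 with max % min ≠ 0: the zig-zag walk never covers the grid and n = 0).
def Pre_solution (rows : Int) (columns : Int) : Prop :=
  1 ≤ rows ∧ 1 ≤ columns ∧
    (Int.gcd rows columns ≤ 2 ∨ PySem.Int.mod (max rows columns) (min rows columns) = 0)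
instance (rows : Int) (columns : Int) : Decidable (Pre_solution rows columns) := by
  unfold Pre_solution; infer_instance

def pvWitness_solution : Int × Int := (3, 4)

def Spec_solution (rows : Int) (columns : Int) (out : List (List Int)) : Prop := out = solution_alt rows columns
instance (rows : Int) (columns : Int) (out : List (List Int)) : Decidable (Spec_solution rows columns out) := by unfold Spec_solution; infer_instance

-- ===== CLAIM (what is proved, stated in full; the proofs are below) =====
def Claim_equal_solution : Prop := ∀ (rows : Int) (columns : Int), Dom_solution rows columns → Pre_solution rows columns → Spec_solution rows columns (solution rows columns)

-- ===== LEMMAS AND PROOFS =====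

-- the count of fully filled rows that isEnd recomputes, as countP
theorem isEnd_eq_countP (answer : List (List Int)) (rows : Int) :
    isEnd answer rows = (((answer.countP (fun r => !r.contains 0) : Nat) : Int) == rows) := by
  unfold isEnd
  have h : (fun (acc : Int) (a : List Int) => if a.contains 0 then acc else acc + 1)
      = (fun (acc : Int) (a : List Int) => if (!a.contains 0) then acc + 1 else acc) := by
    funext acc a; cases h : a.contains 0 <;> simp
  rw [h, PySem.List.foldl_count_if]
  simp


-- index/update helpers reduced to getElem/set form (all indices in range)
theorem pvGet2_elem (a : List (List Int)) (x y : Int) (hx0 : 0 ≤ x) (hx : x.toNat < a.length)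
    (hy0 : 0 ≤ y) (hy : y.toNat < (a[x.toNat]'hx).length) :
    pvGet2 a x y = (a[x.toNat]'hx)[y.toNat]'hy := by
  unfold pvGet2
  rw [PySem.List.pyGetD_eq_getElem a [] hx0 (by omega), PySem.List.pyGetD_eq_getElem _ 0 hy0 (by omega)]

theorem pvSet2_elem (a : List (List Int)) (x y v : Int) (hx0 : 0 ≤ x) (hx : x.toNat < a.length)
    (hy0 : 0 ≤ y) :
    pvSet2 a x y v = a.set x.toNat ((a[x.toNat]'hx).set y.toNat v) := by
  unfold pvSet2
  rw [PySem.List.pyGetD_eq_getElem a [] hx0 (by omega), PySem.List.pySetD_of_nonneg _ _ hy0,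
    PySem.List.pySetD_of_nonneg _ _ hx0]


-- preservation of B's counters across one write answer[x][y] = v+1 (x,y the NEW coordinates)
theorem step_invs (rows columns : Int) (hr : 0 < rows) (hc : 0 < columns)
    (answer : List (List Int)) (zeros : List Int) (full x y v : Int)
    (hlen : answer.length = rows.toNat)
    (hrows : ∀ row ∈ answer, row.length = columns.toNat)
    (hzeros : zeros = answer.map (fun r => ((r.count 0 : Nat) : Int)))
    (hfull : full = ((answer.countP (fun r => !r.contains 0) : Nat) : Int))
    (hx0 : 0 ≤ x) (hx : x < rows) (hy0 : 0 ≤ y) (hy : y < columns) (hv1 : 1 ≤ v) :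
    ((pvSet2 answer x y (v + 1)).length = rows.toNat) ∧
    (∀ row ∈ pvSet2 answer x y (v + 1), row.length = columns.toNat) ∧
    ((if PySem.List.pyGetD (PySem.List.pyGetD answer x []) y 0 == 0
        then PySem.List.pySetD zeros x (PySem.List.pyGetD zeros x 0 - 1) else zeros)
      = (pvSet2 answer x y (v + 1)).map (fun r => ((r.count 0 : Nat) : Int))) ∧
    ((if (PySem.List.pyGetD (PySem.List.pyGetD answer x []) y 0 == 0) &&
         (PySem.List.pyGetD (if PySem.List.pyGetD (PySem.List.pyGetD answer x []) y 0 == 0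
             then PySem.List.pySetD zeros x (PySem.List.pyGetD zeros x 0 - 1) else zeros) x 0 == 0)
        then full + 1 else full)
      = (((pvSet2 answer x y (v + 1)).countP (fun r => !r.contains 0) : Nat) : Int)) ∧
    (pvGet2 (pvSet2 answer x y (v + 1)) x y = v + 1) := by
  have hi : x.toNat < answer.length := by omega
  have hrl : (answer[x.toNat]'hi).length = columns.toNat := hrows _ (List.getElem_mem hi)
  have hj : y.toNat < (answer[x.toNat]'hi).length := by omega
  have hzl : zeros.length = answer.length := by rw [hzeros]; simp
  have hget : PySem.List.pyGetD (PySem.List.pyGetD answer x []) y 0 = (answer[x.toNat]'hi)[y.toNat]'hj :=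
    pvGet2_elem answer x y hx0 hi hy0 hj
  have hset : pvSet2 answer x y (v + 1) = answer.set x.toNat ((answer[x.toNat]'hi).set y.toNat (v + 1)) :=
    pvSet2_elem answer x y (v + 1) hx0 hi hy0
  have hwne : ((v + 1 : Int) == 0) = false := by simp; omega
  have hcs := List.count_set (a := v + 1) (b := (0 : Int)) (l := answer[x.toNat]'hi) (i := y.toNat) hj
  rw [hwne] at hcs
  simp only [Bool.false_eq_true, if_false, Nat.add_zero] at hcs
  refine ⟨?_, ?_, ?_, ?_, ?_⟩
  · rw [hset]; simpa using hlen
  · intro r hr'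
    rw [hset] at hr'
    rcases List.mem_or_eq_of_mem_set hr' with h | h
    · exact hrows r h
    · subst h; simpa using hrl
  · rw [hset, List.map_set, ← hzeros, hget]
    by_cases hb : (answer[x.toNat]'hi)[y.toNat]'hj = 0
    · have h1 : 0 < (answer[x.toNat]'hi).count 0 :=
        List.count_pos_iff.mpr (hb ▸ List.getElem_mem hj)
      rw [PySem.List.pySetD_of_nonneg _ _ hx0,
        PySem.List.pyGetD_eq_getElem zeros 0 hx0 (by omega)]
      simp only [hb, BEq.rfl, if_pos]
      congr 1
      have hzv : zeros[x.toNat]'(by omega) = (((answer[x.toNat]'hi).count 0 : Nat) : Int) := by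
        subst hzeros; simp
      rw [hzv, hcs]
      simp [hb]
      omega
    · have hbf : ((answer[x.toNat]'hi)[y.toNat]'hj == 0) = false := by simp [hb]
      rw [hbf]
      simp only [Bool.false_eq_true, if_false]
      have hcnt : ((answer[x.toNat]'hi).set y.toNat (v + 1)).count 0 = (answer[x.toNat]'hi).count 0 := by
        rw [hcs, hbf]; simp
      rw [hcnt]
      have hzv : (((answer[x.toNat]'hi).count 0 : Nat) : Int) = zeros[x.toNat]'(by omega) := by
        subst hzeros; simp
      rw [hzv, List.set_getElem_self]
  · rw [hset, hget]
    have hq : ∀ (r : List Int), (!r.contains 0) = decide (r.count 0 = 0) := by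
      intro r; by_cases h : (0 : Int) ∈ r <;> simp [h, List.count_eq_zero]
    have hcps := List.countP_set (p := fun r => !r.contains 0) (l := answer) (i := x.toNat)
      (a := (answer[x.toNat]'hi).set y.toNat (v + 1)) hi
    by_cases hb : (answer[x.toNat]'hi)[y.toNat]'hj = 0
    · have hmem0 : (0 : Int) ∈ answer[x.toNat]'hi := hb ▸ List.getElem_mem hj
      have h1 : 0 < (answer[x.toNat]'hi).count 0 := List.count_pos_iff.mpr hmem0
      have hqrow : (!(answer[x.toNat]'hi).contains 0) = false := by simp [hmem0]
      have hnew : ((answer[x.toNat]'hi).set y.toNat (v + 1)).count 0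
          = (answer[x.toNat]'hi).count 0 - 1 := by rw [hcs]; simp [hb]
      have hzv : zeros[x.toNat]'(by omega) = (((answer[x.toNat]'hi).count 0 : Nat) : Int) := by
        subst hzeros; simp
      rw [hcps, hqrow]
      simp only [hb, BEq.rfl, Bool.true_and, if_true, Bool.false_eq_true, if_false, Nat.sub_zero]
      rw [PySem.List.pySetD_of_nonneg _ _ hx0,
        PySem.List.pyGetD_eq_getElem (zeros.set x.toNat (PySem.List.pyGetD zeros x 0 - 1)) 0 hx0
          (by simp; omega),
        List.getElem_set_self (by simp; omega),
        PySem.List.pyGetD_eq_getElem zeros 0 hx0 (by omega), hzv]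
      rw [hq, hnew]
      by_cases hone : (answer[x.toNat]'hi).count 0 = 1
      · have : ((((answer[x.toNat]'hi).count 0 : Nat) : Int) - 1 == 0) = true := by
          simp [hone]
        rw [this, hone]
        simp [hfull]
      · have : ((((answer[x.toNat]'hi).count 0 : Nat) : Int) - 1 == 0) = false := by
          simp; omega
        rw [this]
        have : decide ((answer[x.toNat]'hi).count 0 - 1 = 0) = false := by
          simp; omega
        rw [this]
        simp [hfull]
    · have hbf : ((answer[x.toNat]'hi)[y.toNat]'hj == 0) = false := by simp [hb]
      rw [hbf]
      simp only [Bool.false_and, Bool.false_eq_true, if_false]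
      have hcnt : ((answer[x.toNat]'hi).set y.toNat (v + 1)).count 0
          = (answer[x.toNat]'hi).count 0 := by rw [hcs, hbf]; simp
      have hqeq : (!((answer[x.toNat]'hi).set y.toNat (v + 1)).contains 0)
          = (!(answer[x.toNat]'hi).contains 0) := by
        rw [hq, hq, hcnt]
      rw [hcps, hqeq, hfull]
      by_cases hqr : (!(answer[x.toNat]'hi).contains 0) = true
      · have hqpos : 0 < answer.countP (fun r => !r.contains 0) :=
          List.countP_pos_iff.mpr ⟨answer[x.toNat]'hi, List.getElem_mem hi, hqr⟩
        simp only [hqr, if_true]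
        omega
      · have hqr' : (!(answer[x.toNat]'hi).contains 0) = false := by
          simpa using hqr
        simp only [hqr', Bool.false_eq_true, if_false, Nat.sub_zero, Nat.add_zero]
  · rw [hset]
    have hi' : x.toNat < (answer.set x.toNat ((answer[x.toNat]'hi).set y.toNat (v + 1))).length := by
      simpa using hi
    rw [pvGet2_elem _ x y hx0 hi' hy0 (by simpa using hj)]
    simp

-- main loop equivalence: B's zeros/full/v are determined by A's loop state
theorem loop_eq (rows columns n : Int) (hr : 0 < rows) (hc : 0 < columns) :
    ∀ (fuel : Nat) (answer : List (List Int)) (zeros : List Int) (full x y t v : Int),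
    answer.length = rows.toNat →
    (∀ row ∈ answer, row.length = columns.toNat) →
    zeros = answer.map (fun r => ((r.count 0 : Nat) : Int)) →
    full = ((answer.countP (fun r => !r.contains 0) : Nat) : Int) →
    0 ≤ x → x < rows → 0 ≤ y → y < columns →
    pvGet2 answer x y = v → 1 ≤ v →
    loopA rows columns n fuel answer x y t = loopB rows columns n fuel answer zeros full x y t v := by
  intro fuel
  induction fuel with
  | zero =>
    intro answer zeros full x y t v _ _ _ _ _ _ _ _ _ _
    rfl
  | succ fuel ih =>
    intro answer zeros full x y t v hlen hrows hzeros hfull hx0 hx hy0 hy hv hv1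
    have hEnd : isEnd answer rows = (full == rows) := by rw [isEnd_eq_countP, hfull]
    have hstep : ∀ x' y' : Int, 0 ≤ x' → x' < rows → 0 ≤ y' → y' < columns →
        loopA rows columns n fuel (pvSet2 answer x' y' (v + 1)) x' y' (t + 1)
          = loopB rows columns n fuel (pvSet2 answer x' y' (v + 1))
              (if PySem.List.pyGetD (PySem.List.pyGetD answer x' []) y' 0 == 0
                 then PySem.List.pySetD zeros x' (PySem.List.pyGetD zeros x' 0 - 1) else zeros)
              (if (PySem.List.pyGetD (PySem.List.pyGetD answer x' []) y' 0 == 0) &&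
                   (PySem.List.pyGetD (if PySem.List.pyGetD (PySem.List.pyGetD answer x' []) y' 0 == 0
                       then PySem.List.pySetD zeros x' (PySem.List.pyGetD zeros x' 0 - 1) else zeros) x' 0 == 0)
                 then full + 1 else full)
              x' y' (t + 1) (v + 1) := by
      intro x' y' hx'0 hx' hy'0 hy'
      obtain ⟨h1, h2, h3, h4, h5⟩ := step_invs rows columns hr hc answer zeros full x' y' v
        hlen hrows hzeros hfull hx'0 hx' hy'0 hy' hv1
      exact ih _ _ _ _ _ _ _ h1 h2 h3 h4 hx'0 hx' hy'0 hy' h5 (by omega)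
    simp only [loopA, loopB]
    rw [hv]
    have hbreak : ∀ (SA SB : List (List Int)), SA = SB →
        (if (n != 0 && n == t) = true then answer
         else if (n == 0 && isEnd answer rows) = true then answer else SA)
        = (if (if (n != 0) = true then t != n else full != rows) = true then SB else answer) := by
      intro SA SB hS
      subst hS
      by_cases hn : n = 0
      · have h1 : (n != 0) = false := by simp [hn]
        have h2 : (n == 0) = true := by simp [hn]
        rw [h1, h2, hEnd]
        by_cases hf : full = rows
        · simp [hf]
        · have h3 : (full == rows) = false := by simp [hf]
          have h4 : (full != rows) = true := by simp [hf]
          rw [h3, h4]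
          simp
      · have h1 : (n != 0) = true := by simp [hn]
        have h2 : (n == 0) = false := by simp [hn]
        rw [h1, h2]
        by_cases ht : t = n
        · have h3 : (n == t) = true := by simp [ht]
          have h4 : (t != n) = false := by simp [ht]
          rw [h3, h4]
          simp
        · have h3 : (n == t) = false := by simp; omega
          have h4 : (t != n) = true := by simp [ht]
          rw [h3, h4]
          simp
    have hmodx1 : 0 ≤ PySem.Int.mod (x + 1) rows := by
      rw [PySem.Int.mod_eq_emod_of_pos hr]; exact Int.emod_nonneg _ (by omega)
    have hmodx2 : PySem.Int.mod (x + 1) rows < rows := by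
      rw [PySem.Int.mod_eq_emod_of_pos hr]; exact Int.emod_lt_of_pos _ hr
    have hmody1 : 0 ≤ PySem.Int.mod (y + 1) columns := by
      rw [PySem.Int.mod_eq_emod_of_pos hc]; exact Int.emod_nonneg _ (by omega)
    have hmody2 : PySem.Int.mod (y + 1) columns < columns := by
      rw [PySem.Int.mod_eq_emod_of_pos hc]; exact Int.emod_lt_of_pos _ hc
    rcases PySem.Int.mod_two_eq v with hd | hd <;> rw [hd]
    · -- v even: Python takes dx[0] = 1, dy[0] = 0 (move down)
      have e1 : PySem.List.pyGetD ([1, 0] : List Int) 0 0 = 1 := by decide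
      have e2 : PySem.List.pyGetD ([0, 1] : List Int) 0 0 = 0 := by decide
      have e3 : ((0 : Int) != 0) = false := by decide
      rw [e1, e2, e3, add_zero]
      have hmy : PySem.Int.mod y columns = y := by
        rw [PySem.Int.mod_eq_emod_of_pos hc]; exact Int.emod_eq_of_lt hy0 hy
      rw [hmy]
      simp only [Bool.false_eq_true, if_false]
      exact hbreak _ _ (hstep (PySem.Int.mod (x + 1) rows) y hmodx1 hmodx2 hy0 hy)
    · -- v odd: Python takes dx[1] = 0, dy[1] = 1 (move right)
      have e1 : PySem.List.pyGetD ([1, 0] : List Int) 1 0 = 0 := by decide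
      have e2 : PySem.List.pyGetD ([0, 1] : List Int) 1 0 = 1 := by decide
      have e3 : ((1 : Int) != 0) = true := by decide
      rw [e1, e2, e3, add_zero]
      have hmx : PySem.Int.mod x rows = x := by
        rw [PySem.Int.mod_eq_emod_of_pos hr]; exact Int.emod_eq_of_lt hx0 hx
      rw [hmx]
      simp only [if_true]
      exact hbreak _ _ (hstep x (PySem.Int.mod (y + 1) columns) hx0 hx hmody1 hmody2)

-- ===== VERDICT (by name: the statement is the Claim_ definition above) =====
theorem solution_spec : Claim_equal_solution := by
  unfold Claim_equal_solution Spec_solution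
  intro rows columns _ hpre
  obtain ⟨hr1, hc1, _⟩ := hpre
  have hr : 0 < rows := by omega
  have hc : 0 < columns := by omega
  have hR : 0 < rows.toNat := by omega
  have hC : 0 < columns.toNat := by omega
  have ha0 : pvSet2 (List.replicate rows.toNat (List.replicate columns.toNat (0 : Int))) 0 0 1
      = (List.replicate rows.toNat (List.replicate columns.toNat (0 : Int))).set 0
          ((List.replicate columns.toNat (0 : Int)).set 0 1) := by
    rw [pvSet2_elem _ 0 0 1 le_rfl (by simpa using hR) le_rfl]
    simp
  simp only [solution, solution_alt]
  apply loop_eq rows columns _ hr hc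
  · rw [ha0]; simp
  · intro r hmem
    rw [ha0] at hmem
    rcases List.mem_or_eq_of_mem_set hmem with h | h
    · rw [List.eq_of_mem_replicate h]; simp
    · subst h; simp
  · rw [ha0, List.map_set, List.map_replicate,
      PySem.List.pySetD_of_nonneg _ _ le_rfl,
      PySem.List.pyGetD_eq_getElem _ 0 le_rfl (by simp; omega)]
    simp only [Int.toNat_zero, List.getElem_replicate]
    have hcnt0 : (List.count 0 (List.replicate columns.toNat (0 : Int)) : Int) = columns := by
      simp
      omega
    have hcnt1 : (List.count 0 ((List.replicate columns.toNat (0 : Int)).set 0 1) : Int)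
        = columns - 1 := by
      rw [List.count_set (by simpa using hC)]
      simp
      omega
    rw [hcnt0, hcnt1]
  · have hz : PySem.List.pySetD (List.replicate rows.toNat columns) 0
        (PySem.List.pyGetD (List.replicate rows.toNat columns) 0 0 - 1)
        = (List.replicate rows.toNat columns).set 0 (columns - 1) := by
      rw [PySem.List.pySetD_of_nonneg _ _ le_rfl,
        PySem.List.pyGetD_eq_getElem _ 0 le_rfl (by simp; omega)]
      simp
    rw [hz, ha0,
      PySem.List.pyGetD_eq_getElem ((List.replicate rows.toNat columns).set 0 (columns - 1)) 0
        le_rfl (by simp; omega)]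
    simp only [Int.toNat_zero, List.getElem_set_self]
    rw [List.countP_set (by simpa using hR)]
    have hmem0 : (0 : Int) ∈ List.replicate columns.toNat (0 : Int) := by
      simp [List.mem_replicate]
      omega
    have hq0 : (!(List.replicate columns.toNat (0 : Int)).contains 0) = false := by simp [hmem0]
    have hcp0 : List.countP (fun r => !r.contains 0)
        (List.replicate rows.toNat (List.replicate columns.toNat (0 : Int))) = 0 := by
      apply List.countP_eq_zero.mpr
      intro r hmem
      rw [List.eq_of_mem_replicate hmem]
      simp [hmem0]
    simp only [List.getElem_replicate, hq0, hcp0, Bool.false_eq_true, if_false, Nat.sub_zero,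
      Nat.zero_add]
    have hcnt1 : ((List.replicate columns.toNat (0 : Int)).set 0 1).count 0 = columns.toNat - 1 := by
      rw [List.count_set (by simpa using hC)]
      simp
    by_cases h1 : columns = 1
    · have hb1 : ((columns - 1 : Int) == 0) = true := by simp [h1]
      have hq1 : (!((List.replicate columns.toNat (0 : Int)).set 0 1).contains 0) = true := by
        have : ((List.replicate columns.toNat (0 : Int)).set 0 1).count 0 = 0 := by
          rw [hcnt1]; omega
        have hnm := List.count_eq_zero.mp this
        simp [hnm]
      rw [hb1, hq1]
      simp
    · have hb1 : ((columns - 1 : Int) == 0) = false := by simp; omega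
      have hq1 : (!((List.replicate columns.toNat (0 : Int)).set 0 1).contains 0) = false := by
        have : 0 < ((List.replicate columns.toNat (0 : Int)).set 0 1).count 0 := by
          rw [hcnt1]; omega
        have hm := List.count_pos_iff.mp this
        simp [hm]
      rw [hb1, hq1]
      simp
  · omega
  · exact hr
  · omega
  · exact hc
  · rw [ha0, pvGet2_elem _ 0 0 le_rfl (by simp; omega) le_rfl
      (by simp only [Int.toNat_zero, List.getElem_set_self]; simp; omega)]
    simp only [Int.toNat_zero, List.getElem_set_self]
  · omega
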